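-- pv_equiv track=rewrite | github.com/chicharitozzz/RON_AC | V_AC.py | addDepots
-- ===== SOURCE A (Python) =====
-- def addDepots(v, graph):
--   l = []
--   for g in graph: # create copy of graph
--     l.append(g[:])
--   l.pop(0) # remove adjacency list 0, the depots together form list 0
--   for i in l:
--     for j in range(v-1):
--       i.insert(0,i[0]) # insert distance to depots 0,1,...
--   for i in range(v):
--     tmp = [0 for j in range(v)] # distance between depots if 0
--     for j in range(1,len(graph)):
--       tmp.append(graph[0][j]) # append length from depot to customer
--     l.insert(0, tmp)
--   return l
-- ===== SOURCE B (Python) =====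
-- def addDepots(v, graph):
--     top = graph[0]
--     n = len(graph)
--     k = max(v - 1, 0)
--     res = []
--     for _ in range(v):
--         res.append([0 if j < v else top[j - v + 1] for j in range(v + n - 1)])
--     for r in graph[1:]:
--         res.append([r[0] if j < k else r[j - k] for j in range(k + len(r))])
--     return res
-- ===== Notes on version B (the rewrite author's own statement) =====
-- stated objective: alternative
-- what changed: A copies the matrix, pops row 0, grows each remaining row by repeated insert(0, i[0]) and prepends depot rows one by one; B never mutates anything: it computes each output cell directly from its (row, column) coordinates by index arithmetic (0 in the depot block, top[j-v+1] in a depot row, r[0] in the padding columns, r[j-k] elsewhere) and assembles fresh rows.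
import Mathlib
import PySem

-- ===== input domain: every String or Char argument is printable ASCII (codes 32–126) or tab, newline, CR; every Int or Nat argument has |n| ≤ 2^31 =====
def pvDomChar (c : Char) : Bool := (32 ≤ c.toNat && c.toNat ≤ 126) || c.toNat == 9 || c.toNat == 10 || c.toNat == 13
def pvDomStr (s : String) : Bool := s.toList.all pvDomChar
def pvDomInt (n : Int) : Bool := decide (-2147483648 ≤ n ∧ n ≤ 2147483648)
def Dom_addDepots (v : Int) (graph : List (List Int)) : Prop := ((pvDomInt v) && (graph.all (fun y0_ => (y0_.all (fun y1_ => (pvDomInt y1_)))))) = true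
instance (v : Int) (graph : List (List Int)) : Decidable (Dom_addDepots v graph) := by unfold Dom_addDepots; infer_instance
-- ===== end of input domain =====

-- B replaces A's copy-pop-and-mutate construction with a direct cell-by-cell build:
-- each output entry is computed from its (row, column) coordinates by index arithmetic,
-- no list is ever mutated (objective: alternative).  A does not mutate its argument.

-- ===== PORT A =====
-- inner loop 'for j in range(v-1): i.insert(0, i[0])', one step per iteration
def aHeadLoop : Nat → List Int → List Int
  | 0, r => r
  | Nat.succ n, r => aHeadLoop n (r.headD 0 :: r)   -- i[0] total via headD; Pre_ rules out the empty-row IndexError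

def addDepots (v : Int) (graph : List (List Int)) : List (List Int) :=
  -- l = [g[:] for g in graph]; l.pop(0)  (pop on [] raises: excluded by Pre_)
  let l := (graph.map (fun g => PySem.List.slice g none none)).tail
  -- for i in l: for j in range(v-1): i.insert(0, i[0])
  let l := l.map (fun i => aHeadLoop (v - 1).toNat i)
  -- for i in range(v): tmp = [0]*v + [graph[0][j] for j in range(1,len(graph))]; l.insert(0,tmp)
  (List.range v.toNat).foldl
    (fun acc _ =>
      (List.replicate v.toNat 0 ++
        (PySem.List.pyRange 1 (graph.length : Int) 1).map
          (fun j => PySem.List.pyGetD (graph.headD []) j 0)) :: acc) l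

-- ===== PORT B =====
def addDepots_alt (v : Int) (graph : List (List Int)) : List (List Int) :=
  let top := graph.headD []            -- top = graph[0]; Pre_ guarantees graph ≠ []
  let n : Int := graph.length
  let k : Int := max (v - 1) 0
  -- for _ in range(v): [0 if j < v else top[j-v+1] for j in range(v+n-1)]
  let depotRows := (List.range v.toNat).map (fun _ =>
    (List.range (v + n - 1).toNat).map (fun (jn : Nat) =>
      if (jn : Int) < v then (0 : Int) else PySem.List.pyGetD top ((jn : Int) - v + 1) 0))
  -- for r in graph[1:]: [r[0] if j < k else r[j-k] for j in range(k+len(r))]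
  let custRows := (PySem.List.slice graph (some 1) none).map (fun r =>
    (List.range (k + (r.length : Int)).toNat).map (fun (jn : Nat) =>
      if (jn : Int) < k then r.headD 0 else PySem.List.pyGetD r ((jn : Int) - k) 0))
  depotRows ++ custRows

-- ===== PRECONDITION & SPEC =====
-- Pre_ excludes exactly the inputs on which A raises IndexError: the empty graph (l.pop(0)),
-- a depot row graph[0] shorter than len(graph) when v ≥ 1 (graph[0][j] out of range), and an
-- empty customer row when v ≥ 2 (i[0] on an empty list).
def Pre_addDepots (v : Int) (graph : List (List Int)) : Prop :=
  graph ≠ [] ∧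
  (1 ≤ v → 2 ≤ graph.length → graph.length ≤ (graph.headD []).length) ∧
  (2 ≤ v → ∀ row ∈ graph.tail, row ≠ [])
instance (v : Int) (graph : List (List Int)) : Decidable (Pre_addDepots v graph) := by
  unfold Pre_addDepots; infer_instance

def pvWitness_addDepots : Int × List (List Int) := (2, [[0, 5, 6], [5, 0, 7], [6, 7, 0]])

def Spec_addDepots (v : Int) (graph : List (List Int)) (out : List (List Int)) : Prop := out = addDepots_alt v graph
instance (v : Int) (graph : List (List Int)) (out : List (List Int)) : Decidable (Spec_addDepots v graph out) := by unfold Spec_addDepots; infer_instance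

-- ===== CLAIM (what is proved, stated in full; the proofs are below) =====
def Claim_equal_addDepots : Prop := ∀ (v : Int) (graph : List (List Int)), Dom_addDepots v graph → Pre_addDepots v graph → Spec_addDepots v graph (addDepots v graph)

-- ===== LEMMAS AND PROOFS =====

-- folding a constant prepend over range n is replicate
theorem foldl_range_cons_const {α : Type} (t : α) :
    ∀ (n : Nat) (l : List α),
      (List.range n).foldl (fun acc _ => t :: acc) l = List.replicate n t ++ l := by
  intro n
  induction n with
  | zero => intro l; simp
  | succ m ih =>
      intro l
      simp only [List.range_succ, List.foldl_append, List.foldl_cons, List.foldl_nil, ih]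
      simp [List.replicate_succ]

theorem aHeadLoop_cons (h : Int) : ∀ (m : Nat) (t : List Int),
    aHeadLoop m (h :: t) = List.replicate m h ++ h :: t := by
  intro m
  induction m with
  | zero => intro t; simp [aHeadLoop]
  | succ s ihs =>
      intro t
      show aHeadLoop s (h :: h :: t) = _
      rw [ihs (h :: t)]
      simp [List.replicate_succ']

theorem aHeadLoop_eq (r : List Int) (m : Nat) :
    aHeadLoop m r = List.replicate m (r.headD 0) ++ r := by
  cases r with
  | nil =>
      cases m with
      | zero => simp [aHeadLoop]
      | succ p =>
          show aHeadLoop p (0 :: []) = _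
          rw [aHeadLoop_cons 0 p []]
          simp [List.replicate_succ']
  | cons h tl => simpa using aHeadLoop_cons h m tl

-- B's coordinate formula for a customer row equals "k copies of the head, then the row"
theorem custRow_eq (r : List Int) (k : Int) (hk : 0 ≤ k) :
    (List.range (k + (r.length : Int)).toNat).map (fun (jn : Nat) =>
        if (jn : Int) < k then r.headD 0 else PySem.List.pyGetD r ((jn : Int) - k) 0) =
      List.replicate k.toNat (r.headD 0) ++ r := by
  apply List.ext_getElem
  · simp; omega
  · intro t h1 h2
    simp only [List.getElem_map, List.getElem_range]
    have ht' : t < k.toNat + r.length := by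
      simp only [List.length_map, List.length_range] at h1; omega
    by_cases hc : (t : Int) < k
    · have ht : t < k.toNat := by omega
      rw [if_pos hc, List.getElem_append_left (by simpa using ht), List.getElem_replicate]
    · have ht : k.toNat ≤ t := by omega
      rw [if_neg hc, List.getElem_append_right (by simpa using ht)]
      have harg : (t : Int) - k = ((t - k.toNat : Nat) : Int) := by omega
      rw [harg, PySem.List.pyGetD_natCast]
      rw [List.getD_eq_getElem r 0 (by omega)]
      simp only [List.length_replicate]

-- B's coordinate formula for a depot row equals A's depot row
theorem depotRow_eq (top : List Int) (nn : Nat) (v : Int) (hv : 1 ≤ v) :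
    (List.range (v + ((nn + 1 : Nat) : Int) - 1).toNat).map (fun (jn : Nat) =>
        if (jn : Int) < v then (0 : Int) else PySem.List.pyGetD top ((jn : Int) - v + 1) 0) =
      List.replicate v.toNat 0 ++
        (PySem.List.pyRange 1 (((nn + 1 : Nat)) : Int) 1).map (fun j => PySem.List.pyGetD top j 0) := by
  rw [PySem.List.pyRange_one]
  have h1 : ((((nn + 1 : Nat)) : Int) - 1).toNat = nn := by omega
  rw [h1]
  apply List.ext_getElem
  · simp; omega
  · intro t ha hb
    simp only [List.getElem_map, List.getElem_range]
    have ht' : t < v.toNat + nn := by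
      simp only [List.length_map, List.length_range] at ha; omega
    by_cases hc : (t : Int) < v
    · have ht : t < v.toNat := by omega
      rw [if_pos hc, List.getElem_append_left (by simpa using ht), List.getElem_replicate]
    · have ht : v.toNat ≤ t := by omega
      rw [if_neg hc, List.getElem_append_right (by simpa using ht)]
      simp only [List.getElem_map, List.getElem_range, List.length_replicate]
      have harg : (t : Int) - v + 1 = 1 + ((t - v.toNat : Nat) : Int) := by omega
      rw [harg]

-- ===== VERDICT (by name: the statement is the Claim_ definition above) =====
theorem addDepots_spec : Claim_equal_addDepots := by
  intro v graph _ hpre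
  obtain ⟨hne, hlen, _⟩ := hpre
  obtain ⟨top, rest, rfl⟩ := List.exists_cons_of_ne_nil hne
  unfold Spec_addDepots addDepots addDepots_alt
  simp only [PySem.List.slice_none_none, List.map_id', List.headD_cons, List.tail_cons]
  rw [foldl_range_cons_const]
  have hslice1 : PySem.List.slice (top :: rest) (some 1) none = rest := by
    rw [PySem.List.slice_from_one]; rfl
  rw [hslice1]
  congr 1
  · -- depot rows
    rcases Nat.eq_zero_or_pos v.toNat with hv0 | hvpos
    · simp [hv0]
    · have hv1 : 1 ≤ v := by omega
      have hn : ((top :: rest).length : Int) = ((rest.length + 1 : Nat) : Int) := by simp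
      rw [hn, depotRow_eq top rest.length v hv1]
      simp [List.map_const']
  · -- customer rows
    apply List.map_congr_left
    intro r _
    have hk0 : (0 : Int) ≤ max (v - 1) 0 := le_max_right _ _
    rw [custRow_eq r (max (v - 1) 0) hk0]
    have hkt : (max (v - 1) 0).toNat = (v - 1).toNat := by omega
    rw [hkt, aHeadLoop_eq]
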